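-- pv_equiv track=rewrite | github.com/sarangzambare/quantum_frequency_detector | tools/tools.py | get_fft_from_counts
-- ===== SOURCE A (Python) =====
-- def get_fft_from_counts(counts, n_qubits):
--
--     out = []
--     keys = counts.keys()
--     for i in range(2**n_qubits):
--         id = get_bit_string(i, n_qubits)
--         if(id in keys):
--             out.append(counts[id])
--         else:
--             out.append(0)
--
--     return out
--
-- def get_bit_string(n, n_qubits):
--     """
--     Returns the binary string of an integer with n_qubits characters
--     """
--
--     assert n < 2**n_qubits, 'n too big to binarise, increase n_qubits or decrease n'
--
--     bs = "{0:b}".format(n)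
--     bs = "0"*(n_qubits - len(bs)) + bs
--
--     return bs
-- ===== SOURCE B (Python) =====
-- def get_fft_from_counts(counts, n_qubits):
--     # Parse each canonical bitstring key once into its integer index (a scatter into
--     # an int-keyed dict), then emit the dense list by plain integer lookups --
--     # instead of A's gather that builds and looks up a padded bit STRING per index.
--     dense = {}
--     for key, value in counts.items():
--         if len(key) == n_qubits and key != "" and all(c in "01" for c in key):
--             idx = 0
--             for c in key:
--                 idx = 2 * idx + (1 if c == "1" else 0)
--             dense[idx] = value
--     return [dense.get(i, 0) for i in range(2 ** n_qubits)]
-- ===== Notes on version B (the rewrite author's own statement) =====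
-- stated objective: alternative
-- what changed: B parses each canonical length-n_qubits bitstring key once into its integer index, scattering values into an int-keyed dict, and then emits the dense list by plain integer lookups, instead of A's gather that formats and pads a bit STRING for every one of the 2**n_qubits indices and looks it up in the string dict.
-- intended difference: For n_qubits = 0 A pads '{0:b}'.format(0) to the one-char string '0' and returns [counts.get('0', 0)], so a key '0' leaks into the 0-qubit register; B returns [0] since no length-0 bitstring exists, which is the intended value for an empty register. — e.g. on get_fft_from_counts([("0", 5)], 0): A returns [5], B returns [0]
import Mathlib
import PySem

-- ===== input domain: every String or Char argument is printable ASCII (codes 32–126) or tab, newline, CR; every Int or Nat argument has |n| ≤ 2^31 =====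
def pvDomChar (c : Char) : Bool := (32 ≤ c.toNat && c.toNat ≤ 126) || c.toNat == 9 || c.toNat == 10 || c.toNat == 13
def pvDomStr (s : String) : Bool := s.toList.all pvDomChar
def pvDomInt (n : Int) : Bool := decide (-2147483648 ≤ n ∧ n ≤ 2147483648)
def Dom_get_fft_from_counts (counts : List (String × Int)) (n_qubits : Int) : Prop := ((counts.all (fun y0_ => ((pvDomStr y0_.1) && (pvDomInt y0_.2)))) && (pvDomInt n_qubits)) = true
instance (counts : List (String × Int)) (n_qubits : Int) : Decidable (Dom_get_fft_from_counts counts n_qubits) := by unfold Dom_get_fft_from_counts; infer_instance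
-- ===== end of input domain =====

-- B scatters counts over a pre-allocated array instead of A's gather over all 2**n_qubits
-- padded bit strings; for n_qubits = 0 B returns [0] where A looks up the key "0" (D_ below).


-- ===== PORT A =====
-- "{0:b}".format(n) is PySem.Int.toBinChars; the assert (n < 2**n_qubits) always holds at the
-- call site (i ranges over range(2**n_qubits)), so it is not a raise site of A.
def get_bit_string (n : Int) (n_qubits : Int) : String :=
  let bs := PySem.Int.toBinChars n
  String.ofList (List.replicate (n_qubits - (bs.length : Int)).toNat '0' ++ bs)

def get_fft_from_counts (counts : List (String × Int)) (n_qubits : Int) : List Int :=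
  let d := PySem.Dict.mk counts
  let keys := d.keys
  (PySem.List.pyRange 0 ((2 : Nat) ^ n_qubits.toNat) 1).foldl
    (fun out i =>
      let id := get_bit_string i n_qubits
      if keys.contains id then out ++ [d.getD id 0] else out ++ [0]) []

-- ===== PORT B =====
-- idx accumulation loop of Source B ('idx = 2*idx + (1 if c == "1" else 0)')
def pvBinVal (cs : List Char) : Nat :=
  cs.foldl (fun a c => 2 * a + (if c == '1' then 1 else 0)) 0

-- 'c in "01"' on a single char is exactly c == '0' or c == '1'
def get_fft_from_counts_alt (counts : List (String × Int)) (n_qubits : Int) : List Int :=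
  let dense := counts.foldl (fun (dense : PySem.Dict Int Int) kv =>
    if ((kv.1.toList.length : Int) == n_qubits) && !kv.1.toList.isEmpty
        && kv.1.toList.all (fun c => c == '0' || c == '1') then
      dense.insert ((pvBinVal kv.1.toList : Nat) : Int) kv.2
    else dense) PySem.Dict.empty
  (PySem.List.pyRange 0 ((2 : Nat) ^ n_qubits.toNat) 1).map (fun i => dense.getD i 0)

-- ===== PRECONDITION & SPEC =====
-- Pre_ excludes (a) negative n_qubits, where A raises TypeError (range(2**n_qubits) on a float),
-- and (b) duplicate keys, which a Python dict cannot contain (an artefact of the assoc-list encoding).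
def Pre_get_fft_from_counts (counts : List (String × Int)) (n_qubits : Int) : Prop :=
  0 ≤ n_qubits ∧ (counts.map Prod.fst).Nodup
instance (counts : List (String × Int)) (n_qubits : Int) : Decidable (Pre_get_fft_from_counts counts n_qubits) := by unfold Pre_get_fft_from_counts; infer_instance

def pvWitness_get_fft_from_counts : (List (String × Int)) × Int := ([("1", 3), ("00", 2)], 1)

-- For n_qubits = 0 A pads '{0:b}'.format(0) to the one-char string '0' and returns
-- [counts.get('0', 0)], so a key '0' leaks into the 0-qubit register; B returns [0] since no
-- length-0 bitstring exists, which is the intended value for an empty register.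
def D_get_fft_from_counts (counts : List (String × Int)) (n_qubits : Int) : Prop :=
  n_qubits = 0 ∧ (PySem.Dict.mk counts).getD "0" 0 ≠ 0
instance (counts : List (String × Int)) (n_qubits : Int) : Decidable (D_get_fft_from_counts counts n_qubits) := by unfold D_get_fft_from_counts; infer_instance

def Spec_get_fft_from_counts (counts : List (String × Int)) (n_qubits : Int) (out : List Int) : Prop := ¬ D_get_fft_from_counts counts n_qubits → out = get_fft_from_counts_alt counts n_qubits
instance (counts : List (String × Int)) (n_qubits : Int) (out : List Int) : Decidable (Spec_get_fft_from_counts counts n_qubits out) := by unfold Spec_get_fft_from_counts; infer_instance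

def pvDiffWitness_get_fft_from_counts : (List (String × Int)) × Int := ([("0", 5)], 0)
def pvDiffWitnessOut_get_fft_from_counts : (List Int) × (List Int) := ([5], [0])

-- ===== CLAIM (what is proved, stated in full; the proofs are below) =====
def Claim_unchanged_get_fft_from_counts : Prop := ∀ (counts : List (String × Int)) (n_qubits : Int), Dom_get_fft_from_counts counts n_qubits → Pre_get_fft_from_counts counts n_qubits → Spec_get_fft_from_counts counts n_qubits (get_fft_from_counts counts n_qubits)
def Claim_changed_get_fft_from_counts : Prop := Dom_get_fft_from_counts (pvDiffWitness_get_fft_from_counts.1) (pvDiffWitness_get_fft_from_counts.2) ∧ Pre_get_fft_from_counts (pvDiffWitness_get_fft_from_counts.1) (pvDiffWitness_get_fft_from_counts.2) ∧ D_get_fft_from_counts (pvDiffWitness_get_fft_from_counts.1) (pvDiffWitness_get_fft_from_counts.2) ∧ get_fft_from_counts (pvDiffWitness_get_fft_from_counts.1) (pvDiffWitness_get_fft_from_counts.2) = pvDiffWitnessOut_get_fft_from_counts.1 ∧ get_fft_from_counts_alt (pvDiffWitness_get_fft_from_counts.1) (pvDiffWitness_get_fft_from_counts.2) = pvDiffWitnessOut_get_fft_from_counts.2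 ∧ pvDiffWitnessOut_get_fft_from_counts.1 ≠ pvDiffWitnessOut_get_fft_from_counts.2
def Claim_exact_get_fft_from_counts : Prop := ∀ (counts : List (String × Int)) (n_qubits : Int), Dom_get_fft_from_counts counts n_qubits → Pre_get_fft_from_counts counts n_qubits → D_get_fft_from_counts counts n_qubits → get_fft_from_counts counts n_qubits ≠ get_fft_from_counts_alt counts n_qubits

-- ===== LEMMAS AND PROOFS =====

-- the zero-padded m-bit binary string of i, msb first
def pvBits : Nat → Nat → List Char
  | 0, _ => []
  | m + 1, i => pvBits m (i / 2) ++ [Nat.digitChar (i % 2)]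

-- the unpadded binary representation ('0' for 0), as a structural recursion
def pvBinRec (n : Nat) : List Char :=
  if h : n < 2 then [Nat.digitChar n]
  else pvBinRec (n / 2) ++ [Nat.digitChar (n % 2)]
decreasing_by exact Nat.div_lt_self (by omega) (by omega)

theorem pv_toDigitsCore (f : Nat) : ∀ (n : Nat) (l : List Char), 0 < f → n < 2 ^ f →
    Nat.toDigitsCore 2 f n l = pvBinRec n ++ l := by
  induction f with
  | zero => intro n l hf h; omega
  | succ f ih =>
    intro n l _ h
    rw [Nat.toDigitsCore]
    by_cases h2 : n < 2
    · have hd : n / 2 = 0 := by omega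
      rw [pvBinRec]
      simp only [hd, if_true, h2, dif_pos, List.cons_append, List.nil_append]
      congr 2
      omega
    · have hd : ¬ n / 2 = 0 := by omega
      simp only [hd, if_false]
      have hf' : 0 < f := by
        rcases f with _ | f
        · norm_num at h; omega
        · omega
      rw [ih (n / 2) _ hf' (by
        have := Nat.pow_succ 2 f
        omega)]
      conv_rhs => rw [pvBinRec]
      simp only [h2, dif_neg, not_false_iff, List.append_assoc, List.cons_append, List.nil_append]

theorem pv_toDigits (n : Nat) : Nat.toDigits 2 n = pvBinRec n := by
  rw [Nat.toDigits, pv_toDigitsCore (n + 1) n [] (by omega)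
    (Nat.lt_trans Nat.lt_two_pow_self (Nat.pow_lt_pow_succ (by omega)))]
  simp

theorem pv_length_pvBits (m : Nat) : ∀ i, (pvBits m i).length = m := by
  induction m with
  | zero => intro i; rfl
  | succ m ih => intro i; simp [pvBits, ih]

theorem pv_all01_pvBits (m : Nat) : ∀ i, ∀ c ∈ pvBits m i, c = '0' ∨ c = '1' := by
  induction m with
  | zero => intro i c hc; simp [pvBits] at hc
  | succ m ih =>
    intro i c hc
    simp only [pvBits, List.mem_append, List.mem_singleton] at hc
    rcases hc with hc | hc
    · exact ih _ _ hc
    · rcases Nat.mod_two_eq_zero_or_one i with h | h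
      · left; rw [hc, h]; decide
      · right; rw [hc, h]; decide

theorem pv_binRec_spec (n : Nat) :
    pvBinRec n = pvBits (pvBinRec n).length n ∧ n < 2 ^ (pvBinRec n).length ∧
      (n ≠ 0 → 2 ^ ((pvBinRec n).length - 1) ≤ n) ∧ 0 < (pvBinRec n).length := by
  induction n using Nat.strong_induction_on with
  | _ n ih =>
    by_cases h2 : n < 2
    · rw [pvBinRec]
      simp only [h2, dif_pos, List.length_cons, List.length_nil]
      refine ⟨?_, by omega, fun _ => by omega, by omega⟩
      show [Nat.digitChar n] = pvBits 1 n
      have hd : n / 2 = 0 := by omega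
      simp [pvBits, hd, Nat.mod_eq_of_lt h2]
    · rw [pvBinRec]
      simp only [h2, dif_neg, not_false_iff, List.length_append, List.length_cons, List.length_nil]
      obtain ⟨ha, hb, hc, hd⟩ := ih (n / 2) (Nat.div_lt_self (by omega) (by omega))
      set L := (pvBinRec (n / 2)).length with hL
      refine ⟨?_, ?_, ?_, by omega⟩
      · show pvBinRec (n / 2) ++ [Nat.digitChar (n % 2)] = pvBits (L + 1) n
        rw [pvBits, ← ha]
      · calc n = 2 * (n / 2) + n % 2 := by omega
        _ < 2 ^ (L + 1) := by rw [pow_succ]; omega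
      · intro _
        have h1 : 2 ^ (L - 1) ≤ n / 2 := hc (by omega)
        have hL1 : L - 1 + 1 = L := by omega
        have e : 2 ^ L = 2 ^ (L - 1) * 2 := by
          conv_lhs => rw [← hL1]
          rw [pow_succ]
        rw [Nat.add_sub_cancel, e]
        omega

theorem pv_pvBits_zero_cons (m : Nat) : ∀ i, i < 2 ^ m → pvBits (m + 1) i = '0' :: pvBits m i := by
  induction m with
  | zero =>
    intro i h
    have h0 : i = 0 := by omega
    subst h0; decide
  | succ m ih =>
    intro i h
    show pvBits (m + 1) (i / 2) ++ [Nat.digitChar (i % 2)] = '0' :: (pvBits m (i / 2) ++ [Nat.digitChar (i % 2)])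
    rw [ih (i / 2) (by rw [pow_succ] at h; omega)]
    rfl

theorem pv_pvBits_pad (k : Nat) : ∀ m i, i < 2 ^ m → pvBits (m + k) i = List.replicate k '0' ++ pvBits m i := by
  induction k with
  | zero => intro m i h; simp
  | succ k ih =>
    intro m i h
    have h1 : i < 2 ^ (m + k) := lt_of_lt_of_le h (Nat.pow_le_pow_right (by omega) (by omega))
    have e : m + (k + 1) = (m + k) + 1 := by omega
    rw [e, pv_pvBits_zero_cons _ _ h1, ih m i h]
    simp [List.replicate_succ]

theorem pv_binVal_append (xs : List Char) (c : Char) :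
    pvBinVal (xs ++ [c]) = 2 * pvBinVal xs + (if c == '1' then 1 else 0) := by
  simp [pvBinVal, List.foldl_append]

theorem pv_binVal_pvBits (m : Nat) : ∀ i, i < 2 ^ m → pvBinVal (pvBits m i) = i := by
  induction m with
  | zero =>
    intro i h
    have h0 : i = 0 := by omega
    subst h0; decide
  | succ m ih =>
    intro i h
    rw [pvBits, pv_binVal_append, ih (i / 2) (by rw [pow_succ] at h; omega)]
    rcases Nat.mod_two_eq_zero_or_one i with h2 | h2
    · rw [h2]
      simp only [show ((Nat.digitChar 0) == '1') = false from by decide]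
      simp; omega
    · rw [h2]
      simp only [show ((Nat.digitChar 1) == '1') = true from by decide]
      simp; omega

theorem pv_pvBits_binVal : ∀ (cs : List Char), (∀ c ∈ cs, c = '0' ∨ c = '1') →
    pvBits cs.length (pvBinVal cs) = cs ∧ pvBinVal cs < 2 ^ cs.length := by
  intro cs
  induction cs using List.reverseRecOn with
  | nil => intro _; exact ⟨rfl, by decide⟩
  | append_singleton ys c ih =>
    intro h01
    obtain ⟨ha, hb⟩ := ih (fun c hc => h01 c (by simp [hc]))
    have hd : (if c == '1' then 1 else 0) < 2 := by split <;> omega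
    rw [pv_binVal_append]
    constructor
    · simp only [List.length_append, List.length_cons, List.length_nil]
      rw [pvBits]
      have hdiv : (2 * pvBinVal ys + (if c == '1' then 1 else 0)) / 2 = pvBinVal ys := by omega
      have hmod : (2 * pvBinVal ys + (if c == '1' then 1 else 0)) % 2 = (if c == '1' then 1 else 0) := by omega
      rw [hdiv, hmod, ha]
      congr 1
      rcases h01 c (by simp) with h | h <;> subst h <;> decide
    · simp only [List.length_append, List.length_cons, List.length_nil, pow_succ]
      omega

-- the m-bit zero-padded string A builds is exactly pvBits m i
theorem pv_bit_string (i m : Nat) (hi : i < 2 ^ m) (hm : 0 < m) :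
    get_bit_string (i : Int) (m : Int) = String.ofList (pvBits m i) := by
  have hnn : ¬ ((i : Int) < 0) := by omega
  have hbs : PySem.Int.toBinChars (i : Int) = pvBinRec i := by
    simp [PySem.Int.toBinChars, hnn, pv_toDigits]
  obtain ⟨ha, hb, hc, hd⟩ := pv_binRec_spec i
  set L := (pvBinRec i).length with hL
  have hshow : get_bit_string (i : Int) (m : Int) =
      String.ofList (List.replicate (((m : Nat) : Int) - ((L : Nat) : Int)).toNat '0' ++ pvBinRec i) := by
    simp only [get_bit_string, hbs, hL]
  rw [hshow]
  have hLm : L ≤ m := by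
    by_cases hi0 : i = 0
    · have hb0 : pvBinRec 0 = [Nat.digitChar 0] := by rw [pvBinRec]; simp
      subst hi0
      rw [hL, hb0]
      simpa using hm
    · have h1 : 2 ^ (L - 1) ≤ i := hc hi0
      have h2 : 2 ^ (L - 1) < 2 ^ m := lt_of_le_of_lt h1 hi
      have h3 : L - 1 < m := (Nat.pow_lt_pow_iff_right (by omega)).mp h2
      omega
  have htn : (((m : Nat) : Int) - ((L : Nat) : Int)).toNat = m - L := by omega
  rw [htn]
  congr 1
  have hpad := pv_pvBits_pad (m - L) L i hb
  rw [show L + (m - L) = m from by omega] at hpad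
  rw [hpad, ← ha]

-- A's loop is the map of the padded-string lookup over range(2**n_qubits)
theorem pv_A_eq (counts : List (String × Int)) (n_qubits : Int) :
    get_fft_from_counts counts n_qubits =
      (List.range (2 ^ n_qubits.toNat)).map
        (fun (i : Nat) => (PySem.Dict.mk counts).getD (get_bit_string (i : Int) n_qubits) 0) := by
  unfold get_fft_from_counts
  rw [show (((2 : Nat) : Int)) ^ n_qubits.toNat = ((2 ^ n_qubits.toNat : Nat) : Int) from by push_cast; ring]
  rw [PySem.List.pyRange_zero_natCast, List.foldl_map]
  rw [PySem.List.foldl_congr_mem _ _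
    (fun (out : List Int) (i : Nat) =>
      out ++ [(PySem.Dict.mk counts).getD (get_bit_string (i : Int) n_qubits) 0]) []
    (by
      intro acc i _
      by_cases hc : (PySem.Dict.mk counts).keys.contains (get_bit_string (i : Int) n_qubits) = true
      · rw [if_pos hc]
      · rw [if_neg hc]
        show acc ++ [0] = acc ++ [(PySem.Dict.mk counts).getD (get_bit_string (i : Int) n_qubits) 0]
        have hmem : get_bit_string (i : Int) n_qubits ∉ (PySem.Dict.mk counts).keys := by
          intro h
          exact hc (List.contains_iff_mem.mpr h)
        have hnone := (PySem.Dict.get?_eq_none_iff_not_mem_keys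
          (PySem.Dict.mk counts) (get_bit_string (i : Int) n_qubits)).mpr hmem
        rw [PySem.Dict.getD_eq_get?_getD, hnone, Option.getD_none])]
  rw [PySem.List.foldl_append_singleton_eq_map]
  simp only [List.nil_append]

-- the scatter invariant: with distinct keys, index i holds the value of the canonical key of i
theorem pv_B_get (m : Nat) (hm : 0 < m) :
    ∀ (counts : List (String × Int)) (d : PySem.Dict Int Int),
      (counts.map Prod.fst).Nodup →
      ∀ i : Nat, i < 2 ^ m →
      (counts.foldl (fun (dense : PySem.Dict Int Int) kv =>
          if ((kv.1.toList.length : Int) == ((m : Nat) : Int)) && !kv.1.toList.isEmpty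
              && kv.1.toList.all (fun c => c == '0' || c == '1') then
            dense.insert ((pvBinVal kv.1.toList : Nat) : Int) kv.2
          else dense) d).get? ((i : Nat) : Int) =
        (match (PySem.Dict.mk counts).get? (String.ofList (pvBits m i)) with
          | some v => some v
          | none => d.get? ((i : Nat) : Int)) := by
  intro counts
  induction counts with
  | nil =>
    intro d _ i _
    simp [PySem.Dict.get?]
  | cons kv t ih =>
    intro d hnd i hi
    obtain ⟨k, v⟩ := kv
    simp only [List.map_cons, List.nodup_cons] at hnd
    obtain ⟨hknot, hndt⟩ := hnd
    rw [List.foldl_cons, PySem.Dict.get?_mk_cons]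
    have hner : pvBits m i ≠ [] := by
      intro hx
      have hplen := pv_length_pvBits m i
      rw [hx] at hplen
      simp at hplen
      omega
    by_cases hk : k = String.ofList (pvBits m i)
    · have hnone : (PySem.Dict.mk t).get? k = none := by
        rw [PySem.Dict.get?_eq_none_iff_not_mem_keys, PySem.Dict.keys_mk]
        exact hknot
      subst hk
      simp only [BEq.rfl, if_true]
      have hkl : (String.ofList (pvBits m i)).toList = pvBits m i := by simp
      have hguard : ((((String.ofList (pvBits m i)).toList.length : Int) == ((m : Nat) : Int))
          && !(String.ofList (pvBits m i)).toList.isEmpty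
          && (String.ofList (pvBits m i)).toList.all (fun c => c == '0' || c == '1')) = true := by
        rw [hkl]
        simp only [Bool.and_eq_true, beq_iff_eq, Int.natCast_inj, List.all_eq_true]
        refine ⟨⟨pv_length_pvBits m i, ?_⟩, ?_⟩
        · simp [hner]
        · intro c hc
          rcases pv_all01_pvBits m i c hc with h | h <;> simp [h]
      rw [hguard]
      simp only [if_true]
      rw [hkl, pv_binVal_pvBits m i hi]
      rw [ih (PySem.Dict.insert d ((i : Nat) : Int) v) hndt i hi]
      rw [show (PySem.Dict.mk t : PySem.Dict String Int) = { items := t } from rfl] at hnone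
      rw [hnone]
      exact PySem.Dict.get?_insert_self d ((i : Nat) : Int) v
    · have hbeq : (k == String.ofList (pvBits m i)) = false := beq_eq_false_iff_ne.mpr hk
      rw [hbeq]
      simp only [Bool.false_eq_true, if_false]
      by_cases hg : (((k.toList.length : Int) == ((m : Nat) : Int)) && !k.toList.isEmpty
          && k.toList.all (fun c => c == '0' || c == '1')) = true
      · rw [hg]
        simp only [if_true]
        -- the canonical key of the index k writes is k itself, so it is not index i
        simp only [Bool.and_eq_true, beq_iff_eq, Int.natCast_inj, List.all_eq_true] at hg
        obtain ⟨⟨hglen, _⟩, hg01⟩ := hg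
        have h01 : ∀ c ∈ k.toList, c = '0' ∨ c = '1' := by
          intro c hc
          have h := hg01 c hc
          simp only [Bool.or_eq_true, beq_iff_eq] at h
          exact h
        obtain ⟨hrt, hlt⟩ := pv_pvBits_binVal k.toList h01
        have hne : pvBinVal k.toList ≠ i := by
          intro he
          apply hk
          rw [← he, ← hglen, hrt]
          exact (String.ofList_toList).symm
        have hnei : ((i : Nat) : Int) ≠ ((pvBinVal k.toList : Nat) : Int) := by
          intro he
          apply hne
          exact_mod_cast he.symm
        rw [ih (PySem.Dict.insert d ((pvBinVal k.toList : Nat) : Int) v) hndt i hi]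
        rw [PySem.Dict.get?_insert_of_ne d v hnei]
      · rw [Bool.not_eq_true] at hg
        rw [hg]
        simp only [Bool.false_eq_true, if_false]
        rw [ih d hndt i hi]

-- with n_qubits = 0 no key passes B's guard and the scatter is the identity
theorem pv_B_id_zero :
    ∀ (counts : List (String × Int)) (d : PySem.Dict Int Int),
      (counts.foldl (fun (dense : PySem.Dict Int Int) kv =>
        if ((kv.1.toList.length : Int) == (0 : Int)) && !kv.1.toList.isEmpty
            && kv.1.toList.all (fun c => c == '0' || c == '1') then
          dense.insert ((pvBinVal kv.1.toList : Nat) : Int) kv.2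
        else dense) d) = d := by
  intro counts
  induction counts with
  | nil => intro d; rfl
  | cons kv t ih =>
    intro d
    rw [List.foldl_cons]
    have hg : (((kv.1.toList.length : Int) == (0 : Int)) && !kv.1.toList.isEmpty
        && kv.1.toList.all (fun c => c == '0' || c == '1')) = false := by
      rcases hx : kv.1.toList with _ | ⟨c, cs⟩
      · simp
      · have hb : (((c :: cs).length : Int) == (0 : Int)) = false := by
          rw [beq_eq_false_iff_ne]
          simp only [List.length_cons]
          omega
        simp only [hb, Bool.false_and]
    rw [hg]
    simp only [Bool.false_eq_true, if_false]
    exact ih d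

-- with n_qubits = 0 A returns the lookup of the one-char string "0"
theorem pv_A_zero (counts : List (String × Int)) :
    get_fft_from_counts counts 0 = [(PySem.Dict.mk counts).getD "0" 0] := by
  rw [pv_A_eq]
  have h1 : (2 : Nat) ^ (0 : Int).toNat = 1 := by decide
  rw [h1]
  have h2 : get_bit_string (0 : Int) 0 = "0" := by decide
  simp [List.range_succ, h2]

-- with n_qubits = 0 B returns [0]
theorem pv_B_zero (counts : List (String × Int)) :
    get_fft_from_counts_alt counts 0 = [0] := by
  simp only [get_fft_from_counts_alt]
  rw [pv_B_id_zero]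
  decide

theorem get_fft_from_counts_spec : Claim_unchanged_get_fft_from_counts := by
  intro counts n_qubits _ hpre
  obtain ⟨hn, hnd⟩ := hpre
  unfold Spec_get_fft_from_counts
  intro hD
  by_cases h0 : n_qubits = 0
  · subst h0
    have hz : (PySem.Dict.mk counts).getD "0" 0 = 0 := by
      by_contra hne
      exact hD ⟨rfl, hne⟩
    rw [pv_B_zero, pv_A_zero, hz]
  · have hm : 0 < n_qubits.toNat := by omega
    set m := n_qubits.toNat with hmdef
    have hcast : n_qubits = (m : Int) := by omega
    rw [pv_A_eq]
    simp only [get_fft_from_counts_alt]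
    rw [show (((2 : Nat) : Int)) ^ n_qubits.toNat = ((2 ^ n_qubits.toNat : Nat) : Int) from by push_cast; ring]
    rw [PySem.List.pyRange_zero_natCast, List.map_map]
    apply List.map_congr_left
    intro i hi
    have hilt : i < 2 ^ m := List.mem_range.mp hi
    simp only [Function.comp]
    rw [hcast, pv_bit_string i m hilt hm]
    rw [PySem.Dict.getD_eq_get?_getD, PySem.Dict.getD_eq_get?_getD]
    rw [pv_B_get m hm counts PySem.Dict.empty hnd i hilt]
    rcases hg : (PySem.Dict.mk counts).get? (String.ofList (pvBits m i)) with _ | v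
    · simp [PySem.Dict.get?_empty]
    · simp

-- ===== VERDICT (by name: the statement is the Claim_ definition above) =====
theorem get_fft_from_counts_changed : Claim_changed_get_fft_from_counts := by
  unfold Claim_changed_get_fft_from_counts; decide

theorem get_fft_from_counts_tight : Claim_exact_get_fft_from_counts := by
  intro counts n_qubits _ _ hD
  obtain ⟨h0, hne⟩ := hD
  subst h0
  rw [pv_A_zero, pv_B_zero]
  intro he
  apply hne
  have := congrArg (fun l => l[0]?) he
  simpa using this
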